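-- pv_equiv track=rewrite | github.com/chikitpao/AdventOfCode2023 | Day03/Day03.py | get_surroundings
-- ===== SOURCE A (Python) =====
-- def get_surroundings(n, line_count, column_count):
--     result = []
--
--     check_left = False
--     check_right = False
--     check_up = False
--     check_down = False
--     if n[0] - 1 >= 0:
--         check_up = True
--     if n[0] + 1 < line_count:
--         check_down = True
--     if n[1] - 1 >= 0:
--         check_left = True
--     if n[1] + n[2] < column_count:
--         check_right = True
--
--     if check_up:
--         if check_left:
--             result.append((n[0] - 1, n[1] - 1))
--         for i in range(n[2]):
--             result.append((n[0] - 1, n[1] + i))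
--         if check_right:
--             result.append((n[0] - 1, n[1] + n[2]))
--     if check_left:
--         result.append((n[0], n[1] - 1))
--     if check_right:
--         result.append((n[0], n[1] + n[2]))
--     if check_down:
--         if check_left:
--             result.append((n[0] + 1, n[1] - 1))
--         for i in range(n[2]):
--             result.append((n[0] + 1, n[1] + i))
--         if check_right:
--             result.append((n[0] + 1, n[1] + n[2]))
--
--     return result
-- ===== SOURCE B (Python) =====
-- def get_surroundings(n, line_count, column_count):
--     row, col, length = n
--     # candidate columns of the bounding box, each with its in-grid flag;
--     # cells above/below the number itself carry no column check (the number is in the grid)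
--     cells = [(col - 1, col - 1 >= 0)]
--     cells += [(col + i, True) for i in range(length)]
--     cells.append((col + length, col + length < column_count))
--     result = []
--     for r, r_ok in ((row - 1, row - 1 >= 0), (row, True), (row + 1, row + 1 < line_count)):
--         if not r_ok:
--             continue
--         for c, c_ok in cells:
--             if c_ok and not (r == row and col <= c < col + length):
--                 result.append((r, c))
--     return result
-- ===== Notes on version B (the rewrite author's own statement) =====
-- stated objective: simpler
-- what changed: Replaces the per-edge branching (eight separate guarded appends over up/left/right/down flags) with one uniform double loop: a candidate column list built once with per-cell validity flags, scanned identically for each of the three rows, skipping cells on the number itself.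
import Mathlib
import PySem

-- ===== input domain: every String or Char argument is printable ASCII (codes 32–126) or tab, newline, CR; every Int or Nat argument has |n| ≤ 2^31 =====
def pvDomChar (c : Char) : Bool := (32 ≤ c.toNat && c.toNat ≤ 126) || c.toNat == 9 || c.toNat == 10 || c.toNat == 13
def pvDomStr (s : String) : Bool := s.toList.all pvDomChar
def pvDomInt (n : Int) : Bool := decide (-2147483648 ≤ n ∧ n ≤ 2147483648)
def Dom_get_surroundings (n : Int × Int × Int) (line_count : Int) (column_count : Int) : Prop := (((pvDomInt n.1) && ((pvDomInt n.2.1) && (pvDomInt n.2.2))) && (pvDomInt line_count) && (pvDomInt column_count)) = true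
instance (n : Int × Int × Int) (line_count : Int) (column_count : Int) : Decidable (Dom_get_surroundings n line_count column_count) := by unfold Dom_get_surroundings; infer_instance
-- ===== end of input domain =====

-- B replaces A's per-edge branching by one uniform double loop over a candidate
-- column list with per-cell validity flags (objective: simpler decomposition).

-- ===== PORT A =====
def get_surroundings (n : Int × Int × Int) (line_count : Int) (column_count : Int) : List (Int × Int) :=
  let result : List (Int × Int) := []
  let check_up : Bool := decide (n.1 - 1 ≥ 0)
  let check_down : Bool := decide (n.1 + 1 < line_count)
  let check_left : Bool := decide (n.2.1 - 1 ≥ 0)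
  let check_right : Bool := decide (n.2.1 + n.2.2 < column_count)
  let result := if check_up then
      let result := if check_left then result ++ [(n.1 - 1, n.2.1 - 1)] else result
      let result := (PySem.List.pyRange 0 n.2.2 1).foldl
        (fun acc i => acc ++ [(n.1 - 1, n.2.1 + i)]) result
      if check_right then result ++ [(n.1 - 1, n.2.1 + n.2.2)] else result
    else result
  let result := if check_left then result ++ [(n.1, n.2.1 - 1)] else result
  let result := if check_right then result ++ [(n.1, n.2.1 + n.2.2)] else result
  let result := if check_down then
      let result := if check_left then result ++ [(n.1 + 1, n.2.1 - 1)] else result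
      let result := (PySem.List.pyRange 0 n.2.2 1).foldl
        (fun acc i => acc ++ [(n.1 + 1, n.2.1 + i)]) result
      if check_right then result ++ [(n.1 + 1, n.2.1 + n.2.2)] else result
    else result
  result

-- ===== PORT B =====
def get_surroundings_alt (n : Int × Int × Int) (line_count : Int) (column_count : Int) : List (Int × Int) :=
  let row := n.1
  let col := n.2.1
  let length := n.2.2
  let cells : List (Int × Bool) :=
    [(col - 1, decide (col - 1 ≥ 0))]
    ++ (PySem.List.pyRange 0 length 1).map (fun i => (col + i, true))
    ++ [(col + length, decide (col + length < column_count))]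
  let rows : List (Int × Bool) :=
    [(row - 1, decide (row - 1 ≥ 0)), (row, true), (row + 1, decide (row + 1 < line_count))]
  rows.foldl (fun result q =>
    if q.2 then
      cells.foldl (fun result p =>
        if p.2 && !(q.1 == row && decide (col ≤ p.1) && decide (p.1 < col + length))
        then result ++ [(q.1, p.1)] else result) result
    else result) []

-- ===== PRECONDITION & SPEC =====
def Spec_get_surroundings (n : Int × Int × Int) (line_count : Int) (column_count : Int) (out : List (Int × Int)) : Prop := out = get_surroundings_alt n line_count column_count
instance (n : Int × Int × Int) (line_count : Int) (column_count : Int) (out : List (Int × Int)) : Decidable (Spec_get_surroundings n line_count column_count out) := by unfold Spec_get_surroundings; infer_instance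

-- ===== CLAIM (what is proved, stated in full; the proofs are below) =====
def Claim_equal_get_surroundings : Prop := ∀ (n : Int × Int × Int) (line_count : Int) (column_count : Int), Dom_get_surroundings n line_count column_count → Spec_get_surroundings n line_count column_count (get_surroundings n line_count column_count)

-- ===== LEMMAS AND PROOFS =====

-- B's inner loop over the middle cells of a row r ≠ row: every cell is kept.
theorem pv_mid_other (row col length r : Int) (acc : List (Int × Int)) (hr : r ≠ row) :
    ((PySem.List.pyRange 0 length 1).map (fun i => (col + i, true))).foldl
      (fun result p =>
        if p.2 && !(r == row && decide (col ≤ p.1) && decide (p.1 < col + length))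
        then result ++ [(r, p.1)] else result) acc
    = acc ++ (PySem.List.pyRange 0 length 1).map (fun i => (r, col + i)) := by
  rw [List.foldl_map]
  have h : ∀ (a : List (Int × Int)) (i : Int), i ∈ PySem.List.pyRange 0 length 1 →
      (if ((col + i, true).2 && !(r == row && decide (col ≤ (col + i, true).1) && decide ((col + i, true).1 < col + length)))
        then a ++ [(r, (col + i, true).1)] else a)
      = a ++ [(r, col + i)] := by
    intro a i _
    simp [hr]
  rw [PySem.List.foldl_congr_mem _ _ (fun a i => a ++ [(r, col + i)]) acc h]
  exact PySem.List.foldl_append_singleton_eq_map (f := fun i => (r, col + i)) _ _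

-- B's inner loop over the middle cells of the number's own row: every cell is skipped.
theorem pv_mid_self (row col length : Int) (acc : List (Int × Int)) :
    ((PySem.List.pyRange 0 length 1).map (fun i => (col + i, true))).foldl
      (fun result p =>
        if p.2 && !(row == row && decide (col ≤ p.1) && decide (p.1 < col + length))
        then result ++ [(row, p.1)] else result) acc = acc := by
  rw [List.foldl_map]
  have h : ∀ (a : List (Int × Int)) (i : Int), i ∈ PySem.List.pyRange 0 length 1 →
      (if ((col + i, true).2 && !(row == row && decide (col ≤ (col + i, true).1) && decide ((col + i, true).1 < col + length)))
        then a ++ [(row, (col + i, true).1)] else a) = a := by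
    intro a i hi
    rw [PySem.List.mem_pyRange_one] at hi
    simp [show col ≤ col + i by omega, show col + i < col + length by omega]
  rw [PySem.List.foldl_congr_mem _ _ (fun a _ => a) acc h]
  induction PySem.List.pyRange 0 length 1 <;> simp [List.foldl, *]

-- ===== VERDICT (by name: the statement is the Claim_ definition above) =====
theorem get_surroundings_spec : Claim_equal_get_surroundings := by
  intro n line_count column_count _
  obtain ⟨a, b, c⟩ := n
  unfold Spec_get_surroundings get_surroundings get_surroundings_alt
  simp only [List.foldl_append, List.foldl_cons, List.foldl_nil]
  rw [pv_mid_other a b c (a - 1) _ (by omega), pv_mid_self a b c,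
    pv_mid_other a b c (a + 1) _ (by omega)]
  have h1 : (decide (b ≤ b - 1) && decide (b - 1 < b + c)) = false := by simp
  have h2 : (decide (b ≤ b + c) && decide (b + c < b + c)) = false := by simp
  have hflat : ∀ (l : List Int) (r : Int),
      (l.map (fun x2 => ([(r, b + x2)] : List (Int × Int)))).flatten = l.map (fun i => (r, b + i)) := by
    intro l r
    induction l with
    | nil => simp
    | cons x t ih => simp [ih]
  simp only [beq_self_eq_true, Bool.true_and]
  rw [PySem.List.foldl_append_singleton_eq_map]
  by_cases hu : a - 1 ≥ 0 <;> by_cases hd : a + 1 < line_count <;>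
    by_cases hl : b - 1 ≥ 0 <;> by_cases hr : b + c < column_count <;>
    simp [hd, hr, decide_eq_true_eq, hflat]
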